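-- pv_equiv track=rewrite | github.com/xysdd/png | png/compress.py | dist_code
-- ===== SOURCE A (Python) =====
-- def dist_code(dist):
--     if dist <= 4:
--         return dist - 1, (0, 0)
--     else:
--         for i in range(1, 14):
--             seg = (1 << (i + 1)) + 1
--             nseg = (1 << (i + 2)) + 1
--             if dist < nseg:
--                 return 2 + i * 2 + ((dist - seg) >> i), ((dist - seg) & ((1 << i) - 1), i)
-- ===== SOURCE B (Python) =====
-- def dist_code(dist):
--     if dist <= 4:
--         return dist - 1, (0, 0)
--     i = (dist - 1).bit_length() - 2
--     seg = (1 << (i + 1)) + 1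
--     return 2 + i * 2 + ((dist - seg) >> i), ((dist - seg) & ((1 << i) - 1), i)
-- ===== Notes on version B (the rewrite author's own statement) =====
-- stated objective: simpler
-- what changed: Replaces the segment-search loop with a closed-form computation of the distance-code index via (dist-1).bit_length()-2.
-- outside the precondition, e.g. on dist_code(32769): A returns None, B returns (30, (0, 14)); on dist_code(40000): A returns None, B returns (30, (7231, 14))
import Mathlib
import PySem

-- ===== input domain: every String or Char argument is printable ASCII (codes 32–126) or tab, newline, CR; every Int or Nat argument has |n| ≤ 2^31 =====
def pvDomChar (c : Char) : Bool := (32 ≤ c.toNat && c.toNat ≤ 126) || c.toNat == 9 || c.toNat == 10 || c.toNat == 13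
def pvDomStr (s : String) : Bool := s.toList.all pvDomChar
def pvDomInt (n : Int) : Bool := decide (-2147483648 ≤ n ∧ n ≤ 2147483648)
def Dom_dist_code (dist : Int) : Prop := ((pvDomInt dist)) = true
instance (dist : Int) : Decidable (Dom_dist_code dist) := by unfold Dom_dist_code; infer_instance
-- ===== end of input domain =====

-- B computes the DEFLATE distance-code index in closed form from (dist-1).bit_length() instead of A's segment-search loop (objective: simpler).

-- ===== PORT A =====
-- the for-loop over range(1, 14) with early return; [] is Python's implicit None fall-through (excluded by Pre_)
def distLoopA (dist : Int) : List Int → Int × (Int × Int)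
  | [] => (0, (0, 0))
  | i :: rest =>
      let seg : Int := (1 <<< (i.toNat + 1)) + 1     -- i ∈ 1..13 here, so i.toNat is exact
      let nseg : Int := (1 <<< (i.toNat + 2)) + 1
      if dist < nseg then
        (2 + i * 2 + ((dist - seg) >>> i.toNat),
         (PySem.Int.band (dist - seg) ((1 <<< i.toNat) - 1), i))
      else distLoopA dist rest

def dist_code (dist : Int) : Int × (Int × Int) :=
  if dist ≤ 4 then (dist - 1, (0, 0))
  else distLoopA dist (PySem.List.pyRange 1 14 1)

-- ===== PORT B =====
def dist_code_alt (dist : Int) : Int × (Int × Int) :=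
  if dist ≤ 4 then (dist - 1, (0, 0))
  else
    let i : Nat := PySem.Int.bitLength (dist - 1) - 2   -- dist ≥ 5 here, so bit_length ≥ 3 and Nat subtraction is exact
    let seg : Int := (1 <<< (i + 1)) + 1
    (2 + (i : Int) * 2 + ((dist - seg) >>> i),
     (PySem.Int.band (dist - seg) ((1 <<< i) - 1), (i : Int)))

-- ===== PRECONDITION & SPEC =====
-- Pre_ excludes dist ≥ 32769, on which A's loop falls through and returns None (no value of the declared return type).
def Pre_dist_code (dist : Int) : Prop := dist ≤ 32768
instance (dist : Int) : Decidable (Pre_dist_code dist) := by unfold Pre_dist_code; infer_instance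
def pvWitness_dist_code : Int := (100)

def Spec_dist_code (dist : Int) (out : Int × (Int × Int)) : Prop := out = dist_code_alt dist
instance (dist : Int) (out : Int × (Int × Int)) : Decidable (Spec_dist_code dist out) := by unfold Spec_dist_code; infer_instance

-- ===== CLAIM (what is proved, stated in full; the proofs are below) =====
def Claim_equal_dist_code : Prop := ∀ (dist : Int), Dom_dist_code dist → Pre_dist_code dist → Spec_dist_code dist (dist_code dist)

-- ===== LEMMAS AND PROOFS =====

theorem step_ge (dist i : Int) (rest : List Int)
    (h : (1 <<< (i.toNat + 2) : Int) + 1 ≤ dist) :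
    distLoopA dist (i :: rest) = distLoopA dist rest := by
  simp only [distLoopA]
  rw [if_neg (by omega)]

theorem step_lt (dist i : Int) (rest : List Int)
    (h : dist < (1 <<< (i.toNat + 2) : Int) + 1) :
    distLoopA dist (i :: rest) =
      (2 + i * 2 + ((dist - ((1 <<< (i.toNat + 1)) + 1)) >>> i.toNat),
       (PySem.Int.band (dist - ((1 <<< (i.toNat + 1)) + 1)) ((1 <<< i.toNat) - 1), i)) := by
  simp only [distLoopA]
  rw [if_pos h]
  push_cast
  ring_nf

theorem key (dist : Int) (h5 : 5 ≤ dist) (hle : dist ≤ 32768) :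
    dist_code dist = dist_code_alt dist := by
  have hr : PySem.List.pyRange 1 14 1 = [1,2,3,4,5,6,7,8,9,10,11,12,13] := by decide
  have hlt : (dist - 1).natAbs < 2 ^ PySem.Int.bitLength (dist - 1) := PySem.Int.lt_two_pow_bitLength _
  have hge : 2 ^ (PySem.Int.bitLength (dist - 1) - 1) ≤ (dist - 1).natAbs := PySem.Int.two_pow_bitLength_le _ (by omega)
  obtain ⟨k, hk⟩ : ∃ k, PySem.Int.bitLength (dist - 1) = k := ⟨_, rfl⟩
  rw [hk] at hlt hge
  have hk3 : 3 ≤ k := by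
    by_contra h
    have h2 : (2:ℕ) ^ k ≤ 2 ^ 2 := Nat.pow_le_pow_right (by norm_num) (by omega)
    norm_num at h2
    omega
  have hk15 : k ≤ 15 := by
    by_contra h
    have h2 : (2:ℕ) ^ 15 ≤ 2 ^ (k - 1) := Nat.pow_le_pow_right (by norm_num) (by omega)
    norm_num at h2
    omega
  interval_cases k
  · -- k = 3
    norm_num at hlt hge
    simp only [dist_code, dist_code_alt, hk, hr, if_neg (show ¬ dist ≤ 4 by omega)]
    rw [step_lt dist 1 _ (by norm_num [Int.shiftLeft_eq, Int.toNat]; omega)]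
    norm_num [Int.shiftLeft_eq, Int.toNat]
  · -- k = 4
    norm_num at hlt hge
    simp only [dist_code, dist_code_alt, hk, hr, if_neg (show ¬ dist ≤ 4 by omega)]
    rw [step_ge dist 1 _ (by norm_num [Int.shiftLeft_eq, Int.toNat]; omega), step_lt dist 2 _ (by norm_num [Int.shiftLeft_eq, Int.toNat]; omega)]
    norm_num [Int.shiftLeft_eq, Int.toNat]
  · -- k = 5
    norm_num at hlt hge
    simp only [dist_code, dist_code_alt, hk, hr, if_neg (show ¬ dist ≤ 4 by omega)]
    rw [step_ge dist 1 _ (by norm_num [Int.shiftLeft_eq, Int.toNat]; omega), step_ge dist 2 _ (by norm_num [Int.shiftLeft_eq, Int.toNat]; omega), step_lt dist 3 _ (by norm_num [Int.shiftLeft_eq, Int.toNat]; omega)]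
    norm_num [Int.shiftLeft_eq, Int.toNat]
  · -- k = 6
    norm_num at hlt hge
    simp only [dist_code, dist_code_alt, hk, hr, if_neg (show ¬ dist ≤ 4 by omega)]
    rw [step_ge dist 1 _ (by norm_num [Int.shiftLeft_eq, Int.toNat]; omega), step_ge dist 2 _ (by norm_num [Int.shiftLeft_eq, Int.toNat]; omega), step_ge dist 3 _ (by norm_num [Int.shiftLeft_eq, Int.toNat]; omega), step_lt dist 4 _ (by norm_num [Int.shiftLeft_eq, Int.toNat]; omega)]
    norm_num [Int.shiftLeft_eq, Int.toNat]
  · -- k = 7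
    norm_num at hlt hge
    simp only [dist_code, dist_code_alt, hk, hr, if_neg (show ¬ dist ≤ 4 by omega)]
    rw [step_ge dist 1 _ (by norm_num [Int.shiftLeft_eq, Int.toNat]; omega), step_ge dist 2 _ (by norm_num [Int.shiftLeft_eq, Int.toNat]; omega), step_ge dist 3 _ (by norm_num [Int.shiftLeft_eq, Int.toNat]; omega), step_ge dist 4 _ (by norm_num [Int.shiftLeft_eq, Int.toNat]; omega), step_lt dist 5 _ (by norm_num [Int.shiftLeft_eq, Int.toNat]; omega)]
    norm_num [Int.shiftLeft_eq, Int.toNat]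
  · -- k = 8
    norm_num at hlt hge
    simp only [dist_code, dist_code_alt, hk, hr, if_neg (show ¬ dist ≤ 4 by omega)]
    rw [step_ge dist 1 _ (by norm_num [Int.shiftLeft_eq, Int.toNat]; omega), step_ge dist 2 _ (by norm_num [Int.shiftLeft_eq, Int.toNat]; omega), step_ge dist 3 _ (by norm_num [Int.shiftLeft_eq, Int.toNat]; omega), step_ge dist 4 _ (by norm_num [Int.shiftLeft_eq, Int.toNat]; omega), step_ge dist 5 _ (by norm_num [Int.shiftLeft_eq, Int.toNat]; omega), step_lt dist 6 _ (by norm_num [Int.shiftLeft_eq, Int.toNat]; omega)]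
    norm_num [Int.shiftLeft_eq, Int.toNat]
  · -- k = 9
    norm_num at hlt hge
    simp only [dist_code, dist_code_alt, hk, hr, if_neg (show ¬ dist ≤ 4 by omega)]
    rw [step_ge dist 1 _ (by norm_num [Int.shiftLeft_eq, Int.toNat]; omega), step_ge dist 2 _ (by norm_num [Int.shiftLeft_eq, Int.toNat]; omega), step_ge dist 3 _ (by norm_num [Int.shiftLeft_eq, Int.toNat]; omega), step_ge dist 4 _ (by norm_num [Int.shiftLeft_eq, Int.toNat]; omega), step_ge dist 5 _ (by norm_num [Int.shiftLeft_eq, Int.toNat]; omega), step_ge dist 6 _ (by norm_num [Int.shiftLeft_eq, Int.toNat]; omega), step_lt dist 7 _ (by norm_num [Int.shiftLeft_eq, Int.toNat]; omega)]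
    norm_num [Int.shiftLeft_eq, Int.toNat]
  · -- k = 10
    norm_num at hlt hge
    simp only [dist_code, dist_code_alt, hk, hr, if_neg (show ¬ dist ≤ 4 by omega)]
    rw [step_ge dist 1 _ (by norm_num [Int.shiftLeft_eq, Int.toNat]; omega), step_ge dist 2 _ (by norm_num [Int.shiftLeft_eq, Int.toNat]; omega), step_ge dist 3 _ (by norm_num [Int.shiftLeft_eq, Int.toNat]; omega), step_ge dist 4 _ (by norm_num [Int.shiftLeft_eq, Int.toNat]; omega), step_ge dist 5 _ (by norm_num [Int.shiftLeft_eq, Int.toNat]; omega), step_ge dist 6 _ (by norm_num [Int.shiftLeft_eq, Int.toNat]; omega), step_ge dist 7 _ (by norm_num [Int.shiftLeft_eq, Int.toNat]; omega), step_lt dist 8 _ (by norm_num [Int.shiftLeft_eq, Int.toNat]; omega)]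
    norm_num [Int.shiftLeft_eq, Int.toNat]
  · -- k = 11
    norm_num at hlt hge
    simp only [dist_code, dist_code_alt, hk, hr, if_neg (show ¬ dist ≤ 4 by omega)]
    rw [step_ge dist 1 _ (by norm_num [Int.shiftLeft_eq, Int.toNat]; omega), step_ge dist 2 _ (by norm_num [Int.shiftLeft_eq, Int.toNat]; omega), step_ge dist 3 _ (by norm_num [Int.shiftLeft_eq, Int.toNat]; omega), step_ge dist 4 _ (by norm_num [Int.shiftLeft_eq, Int.toNat]; omega), step_ge dist 5 _ (by norm_num [Int.shiftLeft_eq, Int.toNat]; omega), step_ge dist 6 _ (by norm_num [Int.shiftLeft_eq, Int.toNat]; omega), step_ge dist 7 _ (by norm_num [Int.shiftLeft_eq, Int.toNat]; omega), step_ge dist 8 _ (by norm_num [Int.shiftLeft_eq, Int.toNat]; omega), step_lt dist 9 _ (by norm_num [Int.shiftLeft_eq, Int.toNat]; omega)]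
    norm_num [Int.shiftLeft_eq, Int.toNat]
  · -- k = 12
    norm_num at hlt hge
    simp only [dist_code, dist_code_alt, hk, hr, if_neg (show ¬ dist ≤ 4 by omega)]
    rw [step_ge dist 1 _ (by norm_num [Int.shiftLeft_eq, Int.toNat]; omega), step_ge dist 2 _ (by norm_num [Int.shiftLeft_eq, Int.toNat]; omega), step_ge dist 3 _ (by norm_num [Int.shiftLeft_eq, Int.toNat]; omega), step_ge dist 4 _ (by norm_num [Int.shiftLeft_eq, Int.toNat]; omega), step_ge dist 5 _ (by norm_num [Int.shiftLeft_eq, Int.toNat]; omega), step_ge dist 6 _ (by norm_num [Int.shiftLeft_eq, Int.toNat]; omega), step_ge dist 7 _ (by norm_num [Int.shiftLeft_eq, Int.toNat]; omega), step_ge dist 8 _ (by norm_num [Int.shiftLeft_eq, Int.toNat]; omega), step_ge dist 9 _ (by norm_num [Int.shiftLeft_eq, Int.toNat]; omega), step_lt dist 10 _ (by norm_num [Int.shiftLeft_eq, Int.toNat]; omega)]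
    norm_num [Int.shiftLeft_eq, Int.toNat]
  · -- k = 13
    norm_num at hlt hge
    simp only [dist_code, dist_code_alt, hk, hr, if_neg (show ¬ dist ≤ 4 by omega)]
    rw [step_ge dist 1 _ (by norm_num [Int.shiftLeft_eq, Int.toNat]; omega), step_ge dist 2 _ (by norm_num [Int.shiftLeft_eq, Int.toNat]; omega), step_ge dist 3 _ (by norm_num [Int.shiftLeft_eq, Int.toNat]; omega), step_ge dist 4 _ (by norm_num [Int.shiftLeft_eq, Int.toNat]; omega), step_ge dist 5 _ (by norm_num [Int.shiftLeft_eq, Int.toNat]; omega), step_ge dist 6 _ (by norm_num [Int.shiftLeft_eq, Int.toNat]; omega), step_ge dist 7 _ (by norm_num [Int.shiftLeft_eq, Int.toNat]; omega), step_ge dist 8 _ (by norm_num [Int.shiftLeft_eq, Int.toNat]; omega), step_ge dist 9 _ (by norm_num [Int.shiftLeft_eq, Int.toNat]; omega), step_ge dist 10 _ (by norm_num [Int.shiftLeft_eq, Int.toNat]; omega), step_lt dist 11 _ (by norm_num [Int.shiftLeft_eq, Int.toNat]; omega)]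
    norm_num [Int.shiftLeft_eq, Int.toNat]
  · -- k = 14
    norm_num at hlt hge
    simp only [dist_code, dist_code_alt, hk, hr, if_neg (show ¬ dist ≤ 4 by omega)]
    rw [step_ge dist 1 _ (by norm_num [Int.shiftLeft_eq, Int.toNat]; omega), step_ge dist 2 _ (by norm_num [Int.shiftLeft_eq, Int.toNat]; omega), step_ge dist 3 _ (by norm_num [Int.shiftLeft_eq, Int.toNat]; omega), step_ge dist 4 _ (by norm_num [Int.shiftLeft_eq, Int.toNat]; omega), step_ge dist 5 _ (by norm_num [Int.shiftLeft_eq, Int.toNat]; omega), step_ge dist 6 _ (by norm_num [Int.shiftLeft_eq, Int.toNat]; omega), step_ge dist 7 _ (by norm_num [Int.shiftLeft_eq, Int.toNat]; omega), step_ge dist 8 _ (by norm_num [Int.shiftLeft_eq, Int.toNat]; omega), step_ge dist 9 _ (by norm_num [Int.shiftLeft_eq, Int.toNat]; omega), step_ge dist 10 _ (by norm_num [Int.shiftLeft_eq, Int.toNat]; omega), step_ge dist 11 _ (by norm_num [Int.shiftLeft_eq, Int.toNat]; omega), step_lt dist 12 _ (by norm_num [Int.shiftLeft_eq, Int.toNat];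 omega)]
    norm_num [Int.shiftLeft_eq, Int.toNat]
  · -- k = 15
    norm_num at hlt hge
    simp only [dist_code, dist_code_alt, hk, hr, if_neg (show ¬ dist ≤ 4 by omega)]
    rw [step_ge dist 1 _ (by norm_num [Int.shiftLeft_eq, Int.toNat]; omega), step_ge dist 2 _ (by norm_num [Int.shiftLeft_eq, Int.toNat]; omega), step_ge dist 3 _ (by norm_num [Int.shiftLeft_eq, Int.toNat]; omega), step_ge dist 4 _ (by norm_num [Int.shiftLeft_eq, Int.toNat]; omega), step_ge dist 5 _ (by norm_num [Int.shiftLeft_eq, Int.toNat]; omega), step_ge dist 6 _ (by norm_num [Int.shiftLeft_eq, Int.toNat]; omega), step_ge dist 7 _ (by norm_num [Int.shiftLeft_eq, Int.toNat]; omega), step_ge dist 8 _ (by norm_num [Int.shiftLeft_eq, Int.toNat]; omega), step_ge dist 9 _ (by norm_num [Int.shiftLeft_eq, Int.toNat]; omega), step_ge dist 10 _ (by norm_num [Int.shiftLeft_eq, Int.toNat]; omega), step_ge dist 11 _ (by norm_num [Int.shiftLeft_eq, Int.toNat]; omega), step_ge dist 12 _ (by norm_num [Int.shiftLeft_eq,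 Int.toNat]; omega), step_lt dist 13 _ (by norm_num [Int.shiftLeft_eq, Int.toNat]; omega)]
    norm_num [Int.shiftLeft_eq, Int.toNat]

-- ===== VERDICT (by name: the statement is the Claim_ definition above) =====
theorem dist_code_spec : Claim_equal_dist_code := by
  intro dist _ hpre
  unfold Spec_dist_code
  by_cases h4 : dist ≤ 4
  · simp [dist_code, dist_code_alt, h4]
  · exact key dist (by omega) hpre
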